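-- pv_equiv track=rewrite | github.com/squares-sql/SQUARES | squaresEnumerator.py | findConst
-- ===== SOURCE A (Python) =====
-- def findConst(consts):
-- 	if consts == []:
-- 		return False
-- 	try:
-- 		if int(consts[0][1:-1]):
-- 			return True
-- 	except:
-- 		return findConst(consts[1:])
-- ===== SOURCE B (Python) =====
-- def _inner_int(c):
-- 	try:
-- 		return int(c[1:-1])
-- 	except ValueError:
-- 		return None
--
-- def findConst(consts):
-- 	return any(_inner_int(c) for c in consts)
-- ===== Notes on version B (the rewrite author's own statement) =====
-- stated objective: faster
-- what changed: Replaces the tail recursion that re-slices consts[1:] each call with any() over a generator using a small parse helper, scanning every element.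
-- intended difference: On lists whose first parseable const c (via int(c[1:-1])) parses to zero, A falls off the end and returns None instead of a bool; B keeps scanning and returns True iff some later const parses nonzero, else False, which is the intended 'any const is a nonzero int' semantics. — e.g. on findConst(["a0b"]): A returns none, B returns some false
import Mathlib
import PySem

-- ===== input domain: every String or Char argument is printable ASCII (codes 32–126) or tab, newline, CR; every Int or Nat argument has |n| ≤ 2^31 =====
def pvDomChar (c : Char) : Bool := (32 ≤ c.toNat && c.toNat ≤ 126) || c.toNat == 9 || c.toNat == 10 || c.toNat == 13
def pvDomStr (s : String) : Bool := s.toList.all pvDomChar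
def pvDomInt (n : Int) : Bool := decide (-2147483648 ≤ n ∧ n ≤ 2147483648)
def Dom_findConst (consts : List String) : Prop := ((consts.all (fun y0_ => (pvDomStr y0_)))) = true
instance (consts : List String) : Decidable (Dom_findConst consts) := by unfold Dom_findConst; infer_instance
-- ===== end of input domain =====

-- B scans with any() over a parse helper instead of tail recursion on consts[1:]; return value only.

-- int(c[1:-1]) : shared by both Pythons verbatim
def pvParseMid (c : String) : Option Int :=
  PySem.Int.ofChars? (PySem.List.slice c.toList (some 1) (some (-1)))

-- ===== PORT A =====
def findConst : List String → Option Bool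
  | [] => some false
  | c :: rest =>
    match pvParseMid c with
    | some v => if v ≠ 0 then some true else none   -- falls off the end: None
    | none => findConst rest                        -- bare except → recurse

-- ===== PORT B =====
def findConst_alt (consts : List String) : Option Bool :=
  some (consts.any (fun c =>
    match pvParseMid c with
    | some v => decide (v ≠ 0)
    | none => false))

-- ===== PRECONDITION & SPEC =====
-- On lists whose first parseable const parses to zero, A falls off the end and returns None instead
-- of a bool; B keeps scanning and returns True iff some later const parses nonzero, else False,
-- which is the intended 'any const is a nonzero int' semantics.
def D_findConst (consts : List String) : Prop := consts.findSome? pvParseMid = some 0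
instance (consts : List String) : Decidable (D_findConst consts) := by unfold D_findConst; infer_instance

def Spec_findConst (consts : List String) (out : Option Bool) : Prop := ¬ D_findConst consts → out = findConst_alt consts
instance (consts : List String) (out : Option Bool) : Decidable (Spec_findConst consts out) := by unfold Spec_findConst; infer_instance

def pvDiffWitness_findConst : List String := ["a0b"]
def pvDiffWitnessOut_findConst : (Option Bool) × (Option Bool) := (none, some false)

-- ===== CLAIM =====
def Claim_unchanged_findConst : Prop := ∀ (consts : List String), Dom_findConst consts → Spec_findConst consts (findConst consts)
def Claim_changed_findConst : Prop := Dom_findConst (pvDiffWitness_findConst) ∧ D_findConst (pvDiffWitness_findConst) ∧ findConst (pvDiffWitness_findConst) = pvDiffWitnessOut_findConst.1 ∧ findConst_alt (pvDiffWitness_findConst) = pvDiffWitnessOut_findConst.2 ∧ pvDiffWitnessOut_findConst.1 ≠ pvDiffWitnessOut_findConst.2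
def Claim_exact_findConst : Prop := ∀ (consts : List String), Dom_findConst consts → D_findConst consts → findConst consts ≠ findConst_alt consts

-- ===== LEMMAS AND PROOFS =====
theorem findConst_none_of_D (l : List String) (h : D_findConst l) : findConst l = none := by
  induction l with
  | nil => simp [D_findConst] at h
  | cons c rest ih =>
    unfold D_findConst at h
    rw [List.findSome?_cons] at h
    cases hc : pvParseMid c with
    | some v =>
      rw [hc] at h
      have : v = 0 := by simpa using h
      simp [findConst, hc, this]
    | none =>
      rw [hc] at h
      exact by simpa [findConst, hc] using ih h

theorem findConst_unchanged_aux (consts : List String) (hD : ¬ D_findConst consts) :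
    findConst consts = findConst_alt consts := by
  induction consts with
  | nil => simp [findConst, findConst_alt]
  | cons c rest ih =>
    unfold D_findConst at hD
    rw [List.findSome?_cons] at hD
    cases hc : pvParseMid c with
    | some v =>
      rw [hc] at hD
      have hv : v ≠ 0 := by intro h0; exact hD (by simp [h0])
      simp [findConst, findConst_alt, hc, hv]
    | none =>
      rw [hc] at hD
      have := ih (by simpa [D_findConst] using hD)
      simpa [findConst, findConst_alt, hc] using this

-- ===== VERDICT =====
theorem findConst_spec : Claim_unchanged_findConst := fun consts _ hD =>
  findConst_unchanged_aux consts hD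

theorem findConst_changed : Claim_changed_findConst := by unfold Claim_changed_findConst; decide

theorem findConst_tight : Claim_exact_findConst := by
  intro consts _ hD
  rw [findConst_none_of_D consts hD]
  simp [findConst_alt]
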